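-- pv_equiv track=rewrite | github.com/scj643/cs-final | python/src/breath.py | breaths
-- ===== SOURCE A (Python) =====
-- def breaths(age):
--     """
--
--     :param age: age in years
--     :return:
--     """
--     total = 0
--     while age != -1:
--         if age == 0:
--             total += 25 * 525600
--         if age in range(1,4):
--             total += 20 * 525600
--         if age in range(5,14):
--             total += 15 * 525600
--         if age > 15:
--             total += 11 * 525600
--         age -= 1
--     return total
-- ===== SOURCE B (Python) =====
-- def breaths(age):
--     """
--
--     :param age: age in years
--     :return:
--     """
--     if age < 0:
--         return 0
--     return 525600 * (25
--                      + 20 * min(age, 3)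
--                      + 15 * max(0, min(age, 13) - 4)
--                      + 11 * max(0, age - 15))
-- ===== Notes on version B (the rewrite author's own statement) =====
-- stated objective: faster
-- what changed: Replaces the year-by-year countdown loop with a closed-form formula counting the years in each breath-rate band via min/max.
import Mathlib
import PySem

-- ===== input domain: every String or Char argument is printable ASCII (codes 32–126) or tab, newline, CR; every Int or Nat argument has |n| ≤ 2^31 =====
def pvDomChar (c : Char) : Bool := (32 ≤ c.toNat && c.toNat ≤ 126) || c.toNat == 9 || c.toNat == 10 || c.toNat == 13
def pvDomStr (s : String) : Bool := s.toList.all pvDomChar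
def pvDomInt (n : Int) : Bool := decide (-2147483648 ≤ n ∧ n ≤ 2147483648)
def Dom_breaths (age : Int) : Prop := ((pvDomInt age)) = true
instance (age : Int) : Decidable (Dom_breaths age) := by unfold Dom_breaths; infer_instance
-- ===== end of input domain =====

-- B replaces A's year-by-year countdown loop with a closed-form band count (O(1) vs O(age));
-- equivalence is claimed on Pre_ (age ≥ -1), since A's while-loop never terminates for age < -1.

-- ===== PORT A =====
-- A's while loop: runs while age ≠ -1, decrementing age; for age ≥ -1 it runs (age+1) times,
-- so the fuel (age+1).toNat just makes the same iteration count explicit (0 outside Pre_).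
def breathsLoop : Nat → Int → Int → Int
  | 0, _, total => total
  | n + 1, age, total =>
    let t1 := if age = 0 then total + 25 * 525600 else total
    let t2 := if 1 ≤ age ∧ age < 4 then t1 + 20 * 525600 else t1
    let t3 := if 5 ≤ age ∧ age < 14 then t2 + 15 * 525600 else t2
    let t4 := if age > 15 then t3 + 11 * 525600 else t3
    breathsLoop n (age - 1) t4

def breaths (age : Int) : Int := breathsLoop (age + 1).toNat age 0

-- ===== PORT B =====
def breaths_alt (age : Int) : Int :=
  if age < 0 then 0
  else 525600 * (25
                 + 20 * min age 3
                 + 15 * max 0 (min age 13 - 4)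
                 + 11 * max 0 (age - 15))

-- ===== PRECONDITION & SPEC =====
-- Pre_ excludes age < -1, on which A's while loop never terminates (A diverges; B returns 0 there).
def Pre_breaths (age : Int) : Prop := -1 ≤ age
instance (age : Int) : Decidable (Pre_breaths age) := by unfold Pre_breaths; infer_instance
def pvWitness_breaths : Int := (5)

def Spec_breaths (age : Int) (out : Int) : Prop := out = breaths_alt age
instance (age : Int) (out : Int) : Decidable (Spec_breaths age out) := by unfold Spec_breaths; infer_instance

-- ===== CLAIM (what is proved, stated in full; the proofs are below) =====
def Claim_equal_breaths : Prop := ∀ (age : Int), Dom_breaths age → Pre_breaths age → Spec_breaths age (breaths age)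

-- ===== LEMMAS AND PROOFS =====

-- the accumulator is purely additive
theorem breathsLoop_acc (n : Nat) : ∀ (age total : Int),
    breathsLoop n age total = total + breathsLoop n age 0 := by
  induction n with
  | zero => intro age total; simp [breathsLoop]
  | succ n ih =>
    intro age total
    simp only [breathsLoop]
    rw [ih (age - 1), ih (age - 1) (if age > 15 then _ else _)]
    split_ifs <;> ring

-- main induction: after n iterations starting at age = n - 1
theorem breathsLoop_closed (n : Nat) :
    breathsLoop n ((n : Int) - 1) 0 = breaths_alt ((n : Int) - 1) := by
  induction n with
  | zero => simp [breathsLoop, breaths_alt]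
  | succ n ih =>
    have h : ((n : Int) + 1 - 1) - 1 = (n : Int) - 1 := by ring
    simp only [breathsLoop, Nat.cast_succ, h]
    rw [breathsLoop_acc, ih]
    unfold breaths_alt
    split_ifs <;> omega

-- ===== VERDICT (by name: the statement is the Claim_ definition above) =====
theorem breaths_spec : Claim_equal_breaths := by
  intro age _ hpre
  unfold Spec_breaths breaths
  have hn : age = ((age + 1).toNat : Int) - 1 := by
    unfold Pre_breaths at hpre; omega
  have h := breathsLoop_closed (age + 1).toNat
  rwa [← hn] at h
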